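-- pv_equiv track=rewrite | github.com/yeshjho/Build_Bot | main.py | convert_number_to_emoji
-- ===== SOURCE A (Python) =====
-- def convert_number_to_emoji(num):
--     if num == 0:
--         return ":zero:"
--     elif num == 10:
--         return ":keycap_ten:"
--
--     numbers = ['zero', 'one', 'two', 'three', 'four', 'five', 'six', 'seven', 'eight', 'nine']
--     to_return = ""
--     while num:
--         cipher = num % 10
--         num //= 10
--         to_return = ":" + numbers[cipher] + ":" + to_return
--
--     return to_return
-- ===== SOURCE B (Python) =====
-- def convert_number_to_emoji(num):
--     if num == 0:
--         return ":zero:"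
--     elif num == 10:
--         return ":keycap_ten:"
--
--     numbers = ['zero', 'one', 'two', 'three', 'four', 'five', 'six', 'seven', 'eight', 'nine']
--     return ''.join(':' + numbers[int(d)] + ':' for d in str(num))
-- ===== Notes on version B (the rewrite author's own statement) =====
-- stated objective: idiomatic
-- what changed: Replaces the LSB-first modulo/floor-division loop that prepends to an accumulator with a single left-to-right join over the decimal string representation (str + generator expression).
import Mathlib
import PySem

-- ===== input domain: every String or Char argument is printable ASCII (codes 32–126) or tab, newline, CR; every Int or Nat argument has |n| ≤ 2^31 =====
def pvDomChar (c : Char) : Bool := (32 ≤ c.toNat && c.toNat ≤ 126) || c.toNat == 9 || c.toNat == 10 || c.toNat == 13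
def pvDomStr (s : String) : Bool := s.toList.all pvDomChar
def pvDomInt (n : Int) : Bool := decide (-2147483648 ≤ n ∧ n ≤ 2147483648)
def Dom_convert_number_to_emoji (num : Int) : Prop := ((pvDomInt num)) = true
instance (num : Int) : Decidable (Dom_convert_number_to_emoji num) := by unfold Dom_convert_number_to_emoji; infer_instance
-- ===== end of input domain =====

-- B replaces A's LSB-first modulo/floor-division loop (prepending to an accumulator)
-- with one left-to-right join over the decimal string of num: idiomatic, not faster.


-- ===== PORT A =====
def pvNumbers : List String :=
  ["zero", "one", "two", "three", "four", "five", "six", "seven", "eight", "nine"]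

-- A's while-loop: cipher = num % 10; num //= 10; to_return = ":"+numbers[cipher]+":"+to_return.
-- For num < 0 the Python loop never terminates (outside Pre_); the port returns acc there
-- only to be total.  numbers[cipher] is always in range (cipher ∈ 0..9), so getD "" is exact.
def pvLoopA (num : Int) (acc : String) : String :=
  if num = 0 then acc
  else if _h : 0 < num then
    pvLoopA (PySem.Int.floordiv num 10)
      (":" ++ ((PySem.List.pyGet? pvNumbers (PySem.Int.mod num 10)).getD "") ++ ":" ++ acc)
  else acc
termination_by num.toNat
decreasing_by
  have h10 : PySem.Int.floordiv num 10 = num / 10 := Int.fdiv_eq_ediv_of_nonneg _ (by norm_num)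
  rw [h10]; omega

def convert_number_to_emoji (num : Int) : String :=
  if num = 0 then ":zero:"
  else if num = 10 then ":keycap_ten:"
  else pvLoopA num ""

-- ===== PORT B =====
-- ''.join(':' + numbers[int(d)] + ':' for d in str(num)); int(d) on the digit chars
-- produced by str of a nonnegative int is ported exactly as d.toNat - 48.
def convert_number_to_emoji_alt (num : Int) : String :=
  if num = 0 then ":zero:"
  else if num = 10 then ":keycap_ten:"
  else
    PySem.Str.join ""
      ((PySem.Int.toStr num).toList.map
        (fun d => ":" ++ (pvNumbers.getD (d.toNat - 48) "") ++ ":"))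

-- ===== PRECONDITION & SPEC =====
-- Pre_ excludes num < 0, on which Python A's while-loop never terminates (A returns no value).
def Pre_convert_number_to_emoji (num : Int) : Prop := 0 ≤ num
instance (num : Int) : Decidable (Pre_convert_number_to_emoji num) := by
  unfold Pre_convert_number_to_emoji; infer_instance

def pvWitness_convert_number_to_emoji : Int := (7)

def Spec_convert_number_to_emoji (num : Int) (out : String) : Prop := out = convert_number_to_emoji_alt num
instance (num : Int) (out : String) : Decidable (Spec_convert_number_to_emoji num out) := by unfold Spec_convert_number_to_emoji; infer_instance

-- ===== CLAIM (what is proved, stated in full; the proofs are below) =====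
def Claim_equal_convert_number_to_emoji : Prop := ∀ (num : Int), Dom_convert_number_to_emoji num → Pre_convert_number_to_emoji num → Spec_convert_number_to_emoji num (convert_number_to_emoji num)

-- ===== LEMMAS AND PROOFS =====

-- emoji string for one decimal digit char, as B computes it
def pvEmoji (d : Char) : List Char :=
  (":" ++ (pvNumbers.getD (d.toNat - 48) "") ++ ":").toList

theorem pv_intercalate_nil (l : List (List Char)) :
    ([] : List Char).intercalate l = l.flatten := by
  induction l with
  | nil => simp [List.intercalate]
  | cons x xs ih =>
    cases xs with
    | nil => simp [List.intercalate]
    | cons y ys =>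
      simp only [List.intercalate, List.intersperse] at *
      simpa using ih

theorem pv_core_shift :
    ∀ (f n : ℕ) (ds : List Char), n < f →
      Nat.toDigitsCore 10 f n ds = Nat.toDigitsCore 10 f n [] ++ ds := by
  intro f
  induction f with
  | zero => intro n ds h; omega
  | succ f ih =>
    intro n ds h
    simp only [Nat.toDigitsCore]
    by_cases h0 : n / 10 = 0
    · simp [h0]
    · simp only [h0, if_false]
      have hlt : n / 10 < f := by omega
      rw [ih (n / 10) ((n % 10).digitChar :: ds) hlt,
          ih (n / 10) [(n % 10).digitChar] hlt]
      simp

theorem pv_core_step (n : ℕ) (h0 : n / 10 ≠ 0) :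
    Nat.toDigitsCore 10 (n+1) n [] = Nat.toDigitsCore 10 n (n/10) [(n%10).digitChar] := by
  conv_lhs => rw [Nat.toDigitsCore]
  simp [h0]

theorem pv_core_eq_toDigits :
    ∀ (n f : ℕ), n < f → Nat.toDigitsCore 10 f n [] = Nat.toDigits 10 n := by
  intro n
  induction n using Nat.strong_induction_on with
  | _ n ih =>
    intro f hf
    obtain ⟨f', rfl⟩ : ∃ f', f = f' + 1 := ⟨f - 1, by omega⟩
    by_cases h0 : n / 10 = 0
    · simp [Nat.toDigitsCore, Nat.toDigits, h0]
    · have hn10 : n / 10 < n := by omega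
      have hL : Nat.toDigitsCore 10 (f'+1) n [] = Nat.toDigitsCore 10 f' (n/10) [(n%10).digitChar] := by
        conv_lhs => rw [Nat.toDigitsCore]
        simp [h0]
      rw [hL, Nat.toDigits, pv_core_step n h0,
          pv_core_shift f' (n / 10) _ (by omega),
          pv_core_shift n (n / 10) _ (by omega),
          ih (n / 10) hn10 f' (by omega),
          ih (n / 10) hn10 n (by omega)]

theorem pv_toDigits_step (n : ℕ) (h0 : n / 10 ≠ 0) :
    Nat.toDigits 10 n = Nat.toDigits 10 (n / 10) ++ [(n % 10).digitChar] := by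
  rw [Nat.toDigits, pv_core_step n h0,
      pv_core_shift n (n / 10) _ (by omega),
      pv_core_eq_toDigits (n / 10) n (by omega)]

theorem pv_emoji_arith (d : ℕ) (hd : d < 10) :
    (":" ++ ((PySem.List.pyGet? pvNumbers (d : Int)).getD "") ++ ":").toList
      = pvEmoji d.digitChar := by
  interval_cases d <;> decide

theorem pv_loopA_zero (acc : String) : pvLoopA 0 acc = acc := by
  rw [pvLoopA]; simp

theorem pv_loopA_toList :
    ∀ (n : ℕ), 0 < n → ∀ (acc : String),
      (pvLoopA (n : Int) acc).toList
        = ((Nat.toDigits 10 n).map pvEmoji).flatten ++ acc.toList := by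
  intro n
  induction n using Nat.strong_induction_on with
  | _ n ih =>
    intro hn acc
    rw [pvLoopA]
    simp only [if_neg (by omega : ¬ (n : Int) = 0), dif_pos (by omega : (0:Int) < n)]
    have hfd : PySem.Int.floordiv (n : Int) 10 = ((n / 10 : ℕ) : Int) := by
      unfold PySem.Int.floordiv
      rw [Int.fdiv_eq_ediv_of_nonneg _ (by norm_num)]
      omega
    have hmd : PySem.Int.mod (n : Int) 10 = ((n % 10 : ℕ) : Int) := by
      unfold PySem.Int.mod
      rw [Int.fmod_eq_emod]
      simp

    have hsplit : ∀ acc' : String,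
        (":" ++ ((PySem.List.pyGet? pvNumbers ((n % 10 : ℕ) : Int)).getD "") ++ ":" ++ acc').toList
          = pvEmoji (n % 10).digitChar ++ acc'.toList := by
      intro acc'
      rw [show (":" ++ ((PySem.List.pyGet? pvNumbers ((n % 10 : ℕ) : Int)).getD "") ++ ":" ++ acc').toList
            = (":" ++ ((PySem.List.pyGet? pvNumbers ((n % 10 : ℕ) : Int)).getD "") ++ ":").toList ++ acc'.toList from by
            simp [String.toList_append]]
      rw [pv_emoji_arith (n % 10) (by omega)]
    rw [hfd, hmd]
    by_cases h0 : n / 10 = 0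
    · rw [h0, show ((0 : ℕ) : Int) = 0 from rfl, pv_loopA_zero]
      have hdig : Nat.toDigits 10 n = [(n % 10).digitChar] := by
        simp [Nat.toDigits, Nat.toDigitsCore, h0]
      rw [hdig, hsplit]
      simp
    · have hlt : n / 10 < n := by omega
      rw [ih (n / 10) hlt (by omega) _]
      rw [pv_toDigits_step n h0, hsplit]
      simp

theorem pv_alt_toList (num : Int) (h10 : num ≠ 10) (h0 : num ≠ 0) (h : 0 < num) :
    (convert_number_to_emoji_alt num).toList
      = ((Nat.toDigits 10 num.toNat).map pvEmoji).flatten := by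
  unfold convert_number_to_emoji_alt
  rw [if_neg h0, if_neg h10]
  rw [PySem.Str.toList_join]
  unfold PySem.Chars.join
  rw [show ("" : String).toList = ([] : List Char) from rfl]
  rw [pv_intercalate_nil]
  rw [PySem.Int.toList_toStr]
  have hch : PySem.Int.toChars num = Nat.toDigits 10 num.toNat := by
    unfold PySem.Int.toChars
    rw [if_neg (by omega)]
  rw [hch, List.map_map]
  rfl

-- ===== VERDICT (by name: the statement is the Claim_ definition above) =====
theorem convert_number_to_emoji_spec : Claim_equal_convert_number_to_emoji := by
  intro num _hdom hpre
  unfold Spec_convert_number_to_emoji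
  by_cases h0 : num = 0
  · subst h0; rfl
  · by_cases h10 : num = 10
    · subst h10; rfl
    · have hpos : 0 < num := by
        unfold Pre_convert_number_to_emoji at hpre; omega
      unfold convert_number_to_emoji
      rw [if_neg h0, if_neg h10]
      apply String.toList_inj.mp
      rw [pv_alt_toList num h10 h0 hpos]
      have := pv_loopA_toList num.toNat (by omega) ""
      rw [show ((num.toNat : ℕ) : Int) = num from by omega] at this
      rw [this]
      simp
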